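-- pv_equiv track=rewrite | github.com/Shih-Wei-Lin/Server-Monitor-System | lib/UI/ServerMonitor_1.2.9.py | generate_lights_html
-- ===== SOURCE A (Python) =====
-- def generate_lights_html(num_active_users, max_lights=4):
--     light_colors = ["#28a745", "#ffc107", "#fd7e14", "#dc3545"]
--     lights = []
--     for i in range(max_lights):
--         light_color = (
--             light_colors[min(num_active_users, max_lights) - 1]
--             if i < num_active_users
--             else "#6c757d"
--         )
--         lights.append(
--             f"<div style='width: 0.6em; height: 0.6em; border-radius: 50%; margin-right: 0.3em; background-color: {light_color}; transform: translateY(-0.5em);'></div>"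
--         )
--     return "".join(lights)
-- ===== SOURCE B (Python) =====
-- def generate_lights_html(num_active_users, max_lights=4):
--     light_colors = ["#28a745", "#ffc107", "#fd7e14", "#dc3545"]
--     gray = "#6c757d"
--     template = f"<div style='width: 0.6em; height: 0.6em; border-radius: 50%; margin-right: 0.3em; background-color: {gray}; transform: translateY(-0.5em);'></div>"
--     html = template * max(max_lights, 0)
--     active = max(min(num_active_users, max_lights), 0)
--     if active > 0:
--         html = html.replace(gray, light_colors[min(num_active_users, max_lights) - 1], active)
--     return html
-- ===== Notes on version B (the rewrite author's own statement) =====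
-- stated objective: alternative
-- what changed: Instead of looping over positions and formatting each div with a per-index conditional color, B renders the whole row as one all-gray string by string repetition and then recolors the first active lights with a single str.replace limited to the clamped active count.
-- outside the precondition, e.g. on generate_lights_html(5, 5): A raises IndexError, B raises IndexError
import Mathlib
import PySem

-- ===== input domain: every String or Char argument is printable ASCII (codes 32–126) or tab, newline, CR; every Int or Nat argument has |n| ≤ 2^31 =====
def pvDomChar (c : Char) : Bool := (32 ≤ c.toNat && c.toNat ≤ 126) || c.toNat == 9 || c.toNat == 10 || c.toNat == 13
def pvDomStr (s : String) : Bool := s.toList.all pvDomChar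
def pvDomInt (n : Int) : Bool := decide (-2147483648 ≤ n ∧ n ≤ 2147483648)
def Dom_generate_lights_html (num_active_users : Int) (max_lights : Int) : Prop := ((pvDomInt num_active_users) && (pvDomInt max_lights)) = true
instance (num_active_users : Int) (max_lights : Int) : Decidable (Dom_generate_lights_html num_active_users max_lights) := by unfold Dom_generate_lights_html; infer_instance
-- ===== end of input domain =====

-- B renders the whole row as one all-gray string by string repetition and then recolors the
-- first active lights with a count-limited replace; objective: alternative, same cost.

-- ===== PORT A =====
-- literal transliteration of A: build the div list index by index over range(max_lights),
-- choosing the color by the per-index conditional, then join.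
def generate_lights_html (num_active_users : Int) (max_lights : Int) : String :=
  let light_colors : List String := ["#28a745", "#ffc107", "#fd7e14", "#dc3545"]
  let lights : List String :=
    (PySem.List.pyRange 0 max_lights 1).foldl (fun acc i =>
      let light_color : String :=
        if i < num_active_users then
          -- light_colors[min(num_active_users, max_lights) - 1]; outside Pre_ Python raises IndexError (getD "" is unreachable inside Pre_)
          (PySem.List.pyGet? light_colors (min num_active_users max_lights - 1)).getD ""
        else "#6c757d"
      acc ++ ["<div style='width: 0.6em; height: 0.6em; border-radius: 50%; margin-right: 0.3em; background-color: " ++ light_color ++ "; transform: translateY(-0.5em);'></div>"]) []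
  PySem.Str.join "" lights

-- ===== PORT B =====
-- hand port of Python's str.replace(old, new, count) for the fixed nonempty old = "#6c757d":
-- scan left to right; at a match of old emit new, consume old and decrement the count; exact
-- for this old (CPython replaces the first `count` non-overlapping occurrences left to right).
def pvReplaceMax (new : List Char) : List Char → Nat → List Char
  | s, 0 => s
  | [], _ + 1 => []
  | c :: rest, k + 1 =>
    if "#6c757d".toList.isPrefixOf (c :: rest) then
      new ++ pvReplaceMax new ((c :: rest).drop 7) k
    else
      c :: pvReplaceMax new rest (k + 1)
termination_by s _ => s.length
decreasing_by · simp
              · simp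

-- hand port of Python's `s * n` for a string and a nonnegative int: n concatenated copies (exact).
def pvStrMul (s : String) : Nat → String
  | 0 => ""
  | n + 1 => s ++ pvStrMul s n

-- literal transliteration of B: one all-gray row by repetition, then a count-limited replace.
def generate_lights_html_alt (num_active_users : Int) (max_lights : Int) : String :=
  let light_colors : List String := ["#28a745", "#ffc107", "#fd7e14", "#dc3545"]
  let html : String := pvStrMul "<div style='width: 0.6em; height: 0.6em; border-radius: 50%; margin-right: 0.3em; background-color: #6c757d; transform: translateY(-0.5em);'></div>" (max max_lights 0).toNat
  let active : Int := max (min num_active_users max_lights) 0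
  if active > 0 then
    -- html.replace(gray, light_colors[min(num_active_users, max_lights) - 1], active)
    String.ofList (pvReplaceMax ((PySem.List.pyGet? light_colors (min num_active_users max_lights - 1)).getD "").toList html.toList active.toNat)
  else html

-- ===== PRECONDITION & SPEC =====
-- Pre_ excludes exactly the inputs where Python A raises IndexError: at least one active light
-- with min(num_active_users, max_lights) > 4, so light_colors[min-1] is out of range.
def Pre_generate_lights_html (num_active_users : Int) (max_lights : Int) : Prop :=
  num_active_users ≤ 0 ∨ min num_active_users max_lights ≤ 4
instance (num_active_users : Int) (max_lights : Int) : Decidable (Pre_generate_lights_html num_active_users max_lights) := by unfold Pre_generate_lights_html; infer_instance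

def pvWitness_generate_lights_html : Int × Int := (2, 4)

def Spec_generate_lights_html (num_active_users : Int) (max_lights : Int) (out : String) : Prop := out = generate_lights_html_alt num_active_users max_lights
instance (num_active_users : Int) (max_lights : Int) (out : String) : Decidable (Spec_generate_lights_html num_active_users max_lights out) := by unfold Spec_generate_lights_html; infer_instance

-- ===== CLAIM (what is proved, stated in full; the proofs are below) =====
def Claim_equal_generate_lights_html : Prop := ∀ (num_active_users : Int) (max_lights : Int), Dom_generate_lights_html num_active_users max_lights → Pre_generate_lights_html num_active_users max_lights → Spec_generate_lights_html num_active_users max_lights (generate_lights_html num_active_users max_lights)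

-- ===== LEMMAS AND PROOFS =====

-- proof-level abbreviations for the three pieces of a div
def pvHeadC : List Char := "<div style='width: 0.6em; height: 0.6em; border-radius: 50%; margin-right: 0.3em; background-color: ".toList
def pvTailC : List Char := "; transform: translateY(-0.5em);'></div>".toList
def pvGrayC : List Char := "#6c757d".toList
def pvTmplC : List Char := pvHeadC ++ pvGrayC ++ pvTailC

set_option maxRecDepth 10000 in
theorem pv_tmpl_eq : "<div style='width: 0.6em; height: 0.6em; border-radius: 50%; margin-right: 0.3em; background-color: #6c757d; transform: translateY(-0.5em);'></div>".toList = pvTmplC := by decide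

-- empty-count and empty-string behaviour of the scanner
theorem pvReplaceMax_zero (new : List Char) (s : List Char) : pvReplaceMax new s 0 = s := by
  cases s <;> simp [pvReplaceMax]

theorem pvReplaceMax_nil (new : List Char) (k : Nat) : pvReplaceMax new [] k = [] := by
  cases k <;> simp [pvReplaceMax]

-- skip lemma: a '#'-free block is copied verbatim by the scanner
theorem pvReplaceMax_skip (new : List Char) (p rest : List Char) (k : Nat)
    (hp : '#' ∉ p) : pvReplaceMax new (p ++ rest) k = p ++ pvReplaceMax new rest k := by
  induction p with
  | nil => simp
  | cons c p' ih =>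
    have hc : c ≠ '#' := by intro h; exact hp (by simp [h])
    have hp' : '#' ∉ p' := by intro h; exact hp (by simp [h])
    cases k with
    | zero => simp [pvReplaceMax_zero]
    | succ k' =>
      have hpref : ("#6c757d".toList.isPrefixOf (c :: (p' ++ rest))) = false := by
        simp [List.isPrefixOf]
        intro h
        exact absurd h.symm hc
      simp only [List.cons_append, pvReplaceMax, hpref]
      simp [ih hp']

-- match lemma: at an occurrence of the gray color the scanner substitutes and consumes it
theorem pvReplaceMax_gray (new rest : List Char) (k : Nat) :
    pvReplaceMax new ("#6c757d".toList ++ rest) (k + 1) = new ++ pvReplaceMax new rest k := by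
  have h : "#6c757d".toList ++ rest = '#'::'6'::'c'::'7'::'5'::'7'::'d'::rest := by simp
  rw [h]
  simp [pvReplaceMax, List.isPrefixOf]

-- main characterisation: replacing the first k grays in n gray divs recolors min k n divs
theorem pvReplaceMax_flatten (new : List Char) (n k : Nat) :
    pvReplaceMax new (List.flatten (List.replicate n pvTmplC)) k
      = List.flatten (List.replicate (min k n) (pvHeadC ++ new ++ pvTailC))
        ++ List.flatten (List.replicate (n - min k n) pvTmplC) := by
  induction n generalizing k with
  | zero => simp [pvReplaceMax_nil]
  | succ n ih =>
    cases k with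
    | zero => simp [pvReplaceMax_zero]
    | succ k =>
      have hhead : '#' ∉ pvHeadC := by decide
      have htail : '#' ∉ pvTailC := by decide
      have hmin : min (k + 1) (n + 1) = min k n + 1 := by omega
      rw [List.replicate_succ, List.flatten_cons]
      have hassoc : pvTmplC ++ List.flatten (List.replicate n pvTmplC)
          = pvHeadC ++ ("#6c757d".toList ++ (pvTailC ++ List.flatten (List.replicate n pvTmplC))) := by
        simp [pvTmplC, pvGrayC]
      rw [hassoc, pvReplaceMax_skip new pvHeadC _ _ hhead, pvReplaceMax_gray,
          pvReplaceMax_skip new pvTailC _ _ htail, ih k, hmin]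
      simp [List.replicate_succ]

-- join with empty separator is flatten (Chars.join [] = List.intercalate [])
theorem pv_intercalate_nil (l : List (List Char)) : List.intercalate ([] : List Char) l = l.flatten := by
  induction l with
  | nil => simp [List.intercalate]
  | cons x xs ih =>
    cases xs with
    | nil => simp [List.intercalate]
    | cons y ys =>
      simp only [List.intercalate, List.intersperse_cons₂, List.flatten_cons] at *
      simp [ih]

theorem pv_join_toList (L : List String) : (PySem.Str.join "" L).toList = (L.map String.toList).flatten := by
  simp [PySem.Chars.join, pv_intercalate_nil]

-- repetition unfolds to a flatten of replicated char lists
theorem pvStrMul_toList (s : String) (n : Nat) : (pvStrMul s n).toList = List.flatten (List.replicate n s.toList) := by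
  induction n with
  | zero => simp [pvStrMul]
  | succ n ih => simp [pvStrMul, List.replicate_succ, ih]

-- A's conditional map over range(m) splits into the two colored groups
theorem pv_map_range_eq_groups (m : Nat) (num : Int) (cd gd : String) :
    (PySem.List.pyRange 0 (m : Int) 1).map (fun i => if i < num then cd else gd)
      = List.replicate (min num (m : Int)).toNat cd
        ++ List.replicate (m - (min num (m : Int)).toNat) gd := by
  induction m with
  | zero =>
    rw [show ((0:Nat):Int) = 0 by rfl, PySem.List.pyRange_zero]
    have : (min num (0:Int)).toNat = 0 := by omega
    simp [this]
  | succ k ih =>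
    have hk : (0 : Int) ≤ (k : Int) := by positivity
    rw [show ((k + 1 : Nat) : Int) = (k : Int) + 1 by push_cast; ring,
        PySem.List.pyRange_one_succ_right hk, List.map_append, ih]
    by_cases h : (k : Int) < num
    · have h1 : (min num ((k : Int) + 1)).toNat = k + 1 := by omega
      have h2 : (min num (k : Int)).toNat = k := by omega
      simp [h, h2, List.replicate_succ']
    · have h1 : (min num ((k : Int) + 1)).toNat = (min num (k : Int)).toNat := by omega
      simp only [List.map_cons, List.map_nil, if_neg h, h1, List.append_assoc]
      congr 1
      rw [show k + 1 - (min num (k : Int)).toNat = (k - (min num (k : Int)).toNat) + 1 by omega,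
          List.replicate_succ']

-- toList of a built div string
theorem pv_div_toList (c : String) :
    ("<div style='width: 0.6em; height: 0.6em; border-radius: 50%; margin-right: 0.3em; background-color: " ++ c ++ "; transform: translateY(-0.5em);'></div>").toList
      = pvHeadC ++ c.toList ++ pvTailC := by
  simp [pvHeadC, pvTailC]

-- A's output, as a char list
theorem pv_A_toList (num ml : Int) :
    (generate_lights_html num ml).toList
      = List.flatten (List.replicate (min num (max ml 0)).toNat
            (pvHeadC ++ ((PySem.List.pyGet? ["#28a745", "#ffc107", "#fd7e14", "#dc3545"] (min num ml - 1)).getD "").toList ++ pvTailC)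
          ++ List.replicate ((max ml 0).toNat - (min num (max ml 0)).toNat) pvTmplC) := by
  unfold generate_lights_html
  simp only []
  rw [PySem.List.foldl_append_singleton_eq_map
        (f := fun i => "<div style='width: 0.6em; height: 0.6em; border-radius: 50%; margin-right: 0.3em; background-color: " ++ (if i < num then ((PySem.List.pyGet? ["#28a745", "#ffc107", "#fd7e14", "#dc3545"] (min num ml - 1)).getD "") else "#6c757d") ++ "; transform: translateY(-0.5em);'></div>")]
  rw [List.nil_append, pv_join_toList]
  have hml : PySem.List.pyRange 0 ml 1 = PySem.List.pyRange 0 ((max ml 0).toNat : Int) 1 := by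
    by_cases h : ml ≤ 0
    · rw [PySem.List.pyRange_one_eq_nil h, PySem.List.pyRange_one_eq_nil (by omega)]
    · congr 1; omega
  rw [hml]
  have hsplit := pv_map_range_eq_groups (max ml 0).toNat num
      ("<div style='width: 0.6em; height: 0.6em; border-radius: 50%; margin-right: 0.3em; background-color: " ++ ((PySem.List.pyGet? ["#28a745", "#ffc107", "#fd7e14", "#dc3545"] (min num ml - 1)).getD "") ++ "; transform: translateY(-0.5em);'></div>")
      ("<div style='width: 0.6em; height: 0.6em; border-radius: 50%; margin-right: 0.3em; background-color: " ++ "#6c757d" ++ "; transform: translateY(-0.5em);'></div>")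
  have hfun : (fun i : Int => "<div style='width: 0.6em; height: 0.6em; border-radius: 50%; margin-right: 0.3em; background-color: " ++ (if i < num then ((PySem.List.pyGet? ["#28a745", "#ffc107", "#fd7e14", "#dc3545"] (min num ml - 1)).getD "") else "#6c757d") ++ "; transform: translateY(-0.5em);'></div>")
      = (fun i : Int => if i < num then
          ("<div style='width: 0.6em; height: 0.6em; border-radius: 50%; margin-right: 0.3em; background-color: " ++ ((PySem.List.pyGet? ["#28a745", "#ffc107", "#fd7e14", "#dc3545"] (min num ml - 1)).getD "") ++ "; transform: translateY(-0.5em);'></div>")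
        else
          ("<div style='width: 0.6em; height: 0.6em; border-radius: 50%; margin-right: 0.3em; background-color: " ++ "#6c757d" ++ "; transform: translateY(-0.5em);'></div>")) := by
    funext i; by_cases h : i < num <;> simp [h]
  rw [hfun, hsplit]
  have hmineq : (min num ((((max ml 0).toNat : Nat)) : Int)).toNat = (min num (max ml 0)).toNat := by omega
  simp only [List.map_append, List.map_replicate, List.flatten_append]
  rw [hmineq]
  simp only [pv_div_toList]
  simp [pvTmplC, pvGrayC]

-- B's output, as a char list
theorem pv_B_toList (num ml : Int) :
    (generate_lights_html_alt num ml).toList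
      = List.flatten (List.replicate (min (max (min num ml) 0).toNat (max ml 0).toNat)
            (pvHeadC ++ ((PySem.List.pyGet? ["#28a745", "#ffc107", "#fd7e14", "#dc3545"] (min num ml - 1)).getD "").toList ++ pvTailC)
          ++ List.replicate ((max ml 0).toNat - min (max (min num ml) 0).toNat (max ml 0).toNat) pvTmplC) := by
  unfold generate_lights_html_alt
  simp only []
  by_cases h : max (min num ml) 0 > 0
  · rw [if_pos h]
    rw [show (String.ofList (pvReplaceMax ((PySem.List.pyGet? ["#28a745", "#ffc107", "#fd7e14", "#dc3545"] (min num ml - 1)).getD "").toList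
          (pvStrMul "<div style='width: 0.6em; height: 0.6em; border-radius: 50%; margin-right: 0.3em; background-color: #6c757d; transform: translateY(-0.5em);'></div>" (max ml 0).toNat).toList
          (max (min num ml) 0).toNat)).toList
        = pvReplaceMax ((PySem.List.pyGet? ["#28a745", "#ffc107", "#fd7e14", "#dc3545"] (min num ml - 1)).getD "").toList
          (pvStrMul "<div style='width: 0.6em; height: 0.6em; border-radius: 50%; margin-right: 0.3em; background-color: #6c757d; transform: translateY(-0.5em);'></div>" (max ml 0).toNat).toList
          (max (min num ml) 0).toNat from by simp]
    rw [pvStrMul_toList, pv_tmpl_eq, pvReplaceMax_flatten, List.flatten_append]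
  · rw [if_neg h]
    have h0 : (max (min num ml) 0).toNat = 0 := by omega
    rw [pvStrMul_toList, pv_tmpl_eq, h0]
    simp

-- ===== VERDICT =====
theorem generate_lights_html_spec : Claim_equal_generate_lights_html := by
  intro num ml _ _
  unfold Spec_generate_lights_html
  have hA := pv_A_toList num ml
  have hB := pv_B_toList num ml
  have hcnt : (min num (max ml 0)).toNat = min (max (min num ml) 0).toNat (max ml 0).toNat := by omega
  rw [hcnt] at hA
  exact String.ext (by simpa [String.toList] using hA.trans hB.symm)
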